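-- pv_equiv track=rewrite | github.com/Navi-beep/Python-Projects | student.py | grad
-- ===== SOURCE A (Python) =====
-- def grad(week):
--     absent = 0
--     late = 0
--     for day in week:
--         if day == 'A':
--             absent = absent + 1
--             if absent >= 2:
--                 return False
--         elif day == 'L':
--             late = late + 1
--             if late >= 3:
--                 return False
--     return True
-- ===== SOURCE B (Python) =====
-- def grad(week):
--     return week.count('A') < 2 and week.count('L') < 3
-- ===== Notes on version B (the rewrite author's own statement) =====
-- stated objective: simpler
-- what changed: Replaces the early-return loop with two accumulators by counting 'A' and 'L' with list.count and combining the two threshold checks in one boolean expression.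
import Mathlib
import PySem

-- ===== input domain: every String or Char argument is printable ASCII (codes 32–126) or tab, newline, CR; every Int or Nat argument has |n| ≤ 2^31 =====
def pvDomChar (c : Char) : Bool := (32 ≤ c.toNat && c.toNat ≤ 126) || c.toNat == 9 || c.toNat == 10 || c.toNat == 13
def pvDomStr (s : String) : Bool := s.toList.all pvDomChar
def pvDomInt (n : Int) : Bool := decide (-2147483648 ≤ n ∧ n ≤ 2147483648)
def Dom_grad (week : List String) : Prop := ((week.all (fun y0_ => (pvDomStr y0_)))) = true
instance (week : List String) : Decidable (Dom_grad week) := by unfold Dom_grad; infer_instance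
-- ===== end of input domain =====

-- B replaces A's early-return loop with two list.count totals combined in one boolean check (simpler decomposition, same O(n)).


-- ===== PORT A =====
-- loop with two accumulators and early returns, step for step
def gradAux : List String → Int → Int → Bool
  | [], _, _ => true
  | day :: rest, absent, late =>
    if day == "A" then
      let absent' := absent + 1
      if absent' ≥ 2 then false else gradAux rest absent' late
    else if day == "L" then
      let late' := late + 1
      if late' ≥ 3 then false else gradAux rest absent late'
    else gradAux rest absent late

def grad (week : List String) : Bool := gradAux week 0 0

-- ===== PORT B =====
def grad_alt (week : List String) : Bool :=
  decide (week.count "A" < 2) && decide (week.count "L" < 3)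

-- ===== PRECONDITION & SPEC =====
def Spec_grad (week : List String) (out : Bool) : Prop := out = grad_alt week
instance (week : List String) (out : Bool) : Decidable (Spec_grad week out) := by unfold Spec_grad; infer_instance

-- ===== CLAIM (what is proved, stated in full; the proofs are below) =====
def Claim_equal_grad : Prop := ∀ (week : List String), Dom_grad week → Spec_grad week (grad week)

-- ===== LEMMAS AND PROOFS =====
theorem gradAux_eq (week : List String) : ∀ (a l : Int), a < 2 → l < 3 →
    gradAux week a l = (decide ((week.count "A" : Int) + a < 2) && decide ((week.count "L" : Int) + l < 3)) := by
  induction week with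
  | nil => intro a l ha hl; simp [gradAux]; omega
  | cons day rest ih =>
    intro a l ha hl
    by_cases hA : day = "A"
    · subst hA
      simp only [gradAux, beq_self_eq_true, if_true]
      by_cases h2 : a + 1 ≥ 2
      · simp only [h2, if_true]
        have : (("A" :: rest).count "A" : Int) + a ≥ 2 := by
          simp [List.count_cons]; omega
        simp; omega
      · simp only [h2, if_false]
        rw [ih (a+1) l (by omega) hl]
        simp
        congr 1; simp only [decide_eq_decide]; omega
    · by_cases hL : day = "L"
      · subst hL
        simp only [gradAux, beq_iff_eq, if_neg (by decide : ¬("L" = "A"))]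
        simp only [beq_self_eq_true, if_true]
        by_cases h3 : l + 1 ≥ 3
        · simp only [h3, if_true]
          simp [List.count_cons]; omega
        · simp only [h3, if_false]
          rw [ih a (l+1) ha (by omega)]
          simp
          congr 1; simp only [decide_eq_decide]; omega
      · simp only [gradAux, beq_iff_eq, if_neg hA, if_neg hL]
        rw [ih a l ha hl]
        simp [hA, hL]

-- ===== VERDICT (by name: the statement is the Claim_ definition above) =====
theorem grad_spec : Claim_equal_grad := by
  intro week _
  unfold Spec_grad grad grad_alt
  rw [gradAux_eq week 0 0 (by omega) (by omega)]
  simp
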